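-- pv_equiv track=rewrite | github.com/luigisaetta/workshop_aigen_ita | test_oci_command_r_st.py | inserisci_link_multipli_con_tooltip
-- ===== SOURCE A (Python) =====
-- def inserisci_link_multipli_con_tooltip(stringa, intervalli, urls, tooltips):
--     """
--     to add
--     """
--     # Offset totale dovuto agli inserimenti
--     offset = 0
--
--     for (start, stop), url, tooltip in zip(intervalli, urls, tooltips):
--         # Calcola le nuove posizioni tenendo conto dell'offset
--         start += offset
--         stop += offset
--
--         # Creare il link HTML con il tooltip
--         link_start = f'<a href="{url}" target="_blank" title="{tooltip}">'
--         link_end = "</a>"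
--
--         # Inserisci il tag di apertura del link subito dopo la posizione di start
--         stringa = stringa[:start] + link_start + stringa[start:]
--         # Aggiorna l'offset dopo l'inserimento del tag di apertura
--         offset += len(link_start)
--
--         # Calcola la nuova posizione di stop considerando l'inserimento precedente
--         stop += len(link_start)
--         # Inserisci il tag di chiusura del link subito dopo la posizione di stop
--         stringa = stringa[: stop + 1] + link_end + stringa[stop + 1 :]
--         # Aggiorna l'offset dopo l'inserimento del tag di chiusura
--         offset += len(link_end)
--
--     return stringa
-- ===== SOURCE B (Python) =====
-- def _inserisci(pieces, length, idx, tag):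
--     # normalize idx the way a Python slice bound is read, then split one piece
--     if idx < 0:
--         pos = max(0, length + idx)
--     else:
--         pos = min(idx, length)
--     for i, p in enumerate(pieces):
--         if pos <= len(p):
--             pieces[i : i + 1] = [p[:pos], tag, p[pos:]]
--             return
--         pos -= len(p)
--     pieces.append(tag)
--
--
-- def inserisci_link_multipli_con_tooltip(stringa, intervalli, urls, tooltips):
--     pieces = [stringa]
--     length = len(stringa)
--     offset = 0
--     for (start, stop), url, tooltip in zip(intervalli, urls, tooltips):
--         open_tag = f'<a href="{url}" target="_blank" title="{tooltip}">'
--         _inserisci(pieces, length, start + offset, open_tag)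
--         length += len(open_tag)
--         offset += len(open_tag)
--         _inserisci(pieces, length, stop + offset + 1, "</a>")
--         length += 4
--         offset += 4
--     return "".join(pieces)
-- ===== Notes on version B (the rewrite author's own statement) =====
-- stated objective: alternative
-- what changed: B keeps the text as a list of pieces and, per insertion, splits only the one piece containing the (slice-normalized) position, joining once at the end, instead of A's rebuilding of the entire growing string at every insertion.
import Mathlib
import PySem

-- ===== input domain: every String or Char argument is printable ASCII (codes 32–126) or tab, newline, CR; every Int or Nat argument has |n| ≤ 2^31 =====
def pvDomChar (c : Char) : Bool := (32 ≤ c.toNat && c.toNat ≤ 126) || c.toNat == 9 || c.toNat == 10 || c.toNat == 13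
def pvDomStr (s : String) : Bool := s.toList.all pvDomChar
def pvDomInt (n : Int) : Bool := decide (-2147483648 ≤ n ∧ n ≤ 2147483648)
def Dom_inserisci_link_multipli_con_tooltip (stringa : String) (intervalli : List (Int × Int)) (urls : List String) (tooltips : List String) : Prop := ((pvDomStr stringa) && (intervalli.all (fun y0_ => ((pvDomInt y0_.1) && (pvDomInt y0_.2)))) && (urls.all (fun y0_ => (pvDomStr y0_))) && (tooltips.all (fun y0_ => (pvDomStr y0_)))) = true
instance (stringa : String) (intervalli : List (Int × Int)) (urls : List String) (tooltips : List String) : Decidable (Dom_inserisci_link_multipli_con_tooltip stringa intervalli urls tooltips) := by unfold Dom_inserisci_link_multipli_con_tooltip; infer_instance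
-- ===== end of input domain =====

-- B keeps the text as a list of pieces and splits one piece per insertion instead of
-- A's whole-string reconstruction at every insertion (objective: alternative).

-- ===== PORT A =====
-- the f-string '<a href="{url}" target="_blank" title="{tooltip}">'
def pvLinkStart (url tooltip : String) : List Char :=
  "<a href=\"".toList ++ url.toList ++ "\" target=\"_blank\" title=\"".toList ++ tooltip.toList ++ "\">".toList

-- A's for-loop over zip(intervalli, urls, tooltips), state = (stringa, offset)
def pvALoop : List ((Int × Int) × String × String) → List Char → Int → List Char
  | [], s, _ => s
  | (ab, url, tooltip) :: rest, s, offset =>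
    let start := ab.1 + offset
    let stop := ab.2 + offset
    let link_start := pvLinkStart url tooltip
    let link_end := "</a>".toList
    let s1 := PySem.List.slice s none (some start) ++ link_start ++ PySem.List.slice s (some start) none
    let offset1 := offset + (link_start.length : Int)
    let stop1 := stop + (link_start.length : Int)
    let s2 := PySem.List.slice s1 none (some (stop1 + 1)) ++ link_end ++ PySem.List.slice s1 (some (stop1 + 1)) none
    pvALoop rest s2 (offset1 + (link_end.length : Int))

def inserisci_link_multipli_con_tooltip (stringa : String) (intervalli : List (Int × Int)) (urls : List String) (tooltips : List String) : String :=
  String.ofList (pvALoop (intervalli.zip (urls.zip tooltips)) stringa.toList 0)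

-- ===== PORT B =====
-- _inserisci's piece walk: find the piece containing pos (0 ≤ pos throughout) and split it;
-- falling off the end is Python's pieces.append(tag)
def pvWalk : List (List Char) → Int → List Char → List (List Char)
  | [], _, tag => [tag]
  | p :: ps, pos, tag =>
    if pos ≤ (p.length : Int) then p.take pos.toNat :: tag :: p.drop pos.toNat :: ps
    else p :: pvWalk ps (pos - (p.length : Int)) tag

-- _inserisci(pieces, length, idx, tag): normalize idx like a Python slice bound, then walk
def pvInsert (pieces : List (List Char)) (length idx : Int) (tag : List Char) : List (List Char) :=
  let pos := if idx < 0 then max 0 (length + idx) else min idx length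
  pvWalk pieces pos tag

-- B's for-loop, state = (pieces, length, offset)
def pvBLoop : List ((Int × Int) × String × String) → List (List Char) → Int → Int → List (List Char)
  | [], pieces, _, _ => pieces
  | (ab, url, tooltip) :: rest, pieces, length, offset =>
    let open_tag := pvLinkStart url tooltip
    let pieces1 := pvInsert pieces length (ab.1 + offset) open_tag
    let length1 := length + (open_tag.length : Int)
    let offset1 := offset + (open_tag.length : Int)
    let pieces2 := pvInsert pieces1 length1 (ab.2 + offset1 + 1) ("</a>".toList)
    pvBLoop rest pieces2 (length1 + 4) (offset1 + 4)

def inserisci_link_multipli_con_tooltip_alt (stringa : String) (intervalli : List (Int × Int)) (urls : List String) (tooltips : List String) : String :=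
  let pieces := pvBLoop (intervalli.zip (urls.zip tooltips)) [stringa.toList] (stringa.toList.length : Int) 0
  String.ofList pieces.flatten   -- "".join(pieces)

-- ===== PRECONDITION & SPEC =====
def Spec_inserisci_link_multipli_con_tooltip (stringa : String) (intervalli : List (Int × Int)) (urls : List String) (tooltips : List String) (out : String) : Prop := out = inserisci_link_multipli_con_tooltip_alt stringa intervalli urls tooltips
instance (stringa : String) (intervalli : List (Int × Int)) (urls : List String) (tooltips : List String) (out : String) : Decidable (Spec_inserisci_link_multipli_con_tooltip stringa intervalli urls tooltips out) := by unfold Spec_inserisci_link_multipli_con_tooltip; infer_instance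

-- ===== CLAIM (what is proved, stated in full; the proofs are below) =====
def Claim_equal_inserisci_link_multipli_con_tooltip : Prop := ∀ (stringa : String) (intervalli : List (Int × Int)) (urls : List String) (tooltips : List String), Dom_inserisci_link_multipli_con_tooltip stringa intervalli urls tooltips → Spec_inserisci_link_multipli_con_tooltip stringa intervalli urls tooltips (inserisci_link_multipli_con_tooltip stringa intervalli urls tooltips)

-- ===== LEMMAS AND PROOFS =====

lemma pvSliceTake (xs : List Char) (b : Int) :
    PySem.List.slice xs none (some b) = xs.take (PySem.List.clampIdx xs.length b) := by
  simp [PySem.List.slice, PySem.List.clampIdx]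

lemma pvClampLe (n : Nat) (i : Int) : PySem.List.clampIdx n i ≤ n := by
  simp only [PySem.List.clampIdx]
  split_ifs <;> omega

lemma pvWalk_flatten (tag : List Char) : ∀ (pieces : List (List Char)) (pos : Int),
    0 ≤ pos → pos.toNat ≤ pieces.flatten.length →
    (pvWalk pieces pos tag).flatten
      = pieces.flatten.take pos.toNat ++ tag ++ pieces.flatten.drop pos.toNat := by
  intro pieces
  induction pieces with
  | nil =>
    intro pos h0 hle
    simp only [List.flatten_nil, List.length_nil, Nat.le_zero] at hle
    simp [pvWalk, hle]
  | cons p ps ih =>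
    intro pos h0 hle
    by_cases hp : pos ≤ (p.length : Int)
    · simp only [pvWalk, if_pos hp, List.flatten_cons]
      have h1 : pos.toNat ≤ p.length := by omega
      rw [List.take_append_of_le_length h1, List.drop_append_of_le_length h1]
      simp [List.append_assoc]
    · simp only [pvWalk, if_neg hp, List.flatten_cons]
      have h2 : (0:Int) ≤ pos - (p.length : Int) := by omega
      have hle' : (pos - (p.length : Int)).toNat ≤ ps.flatten.length := by
        simp only [List.flatten_cons, List.length_append] at hle; omega
      have ht : (p ++ ps.flatten).take pos.toNat
          = p ++ ps.flatten.take (pos.toNat - p.length) := by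
        rw [List.take_append, List.take_of_length_le (show p.length ≤ pos.toNat by omega)]
      have hd : (p ++ ps.flatten).drop pos.toNat
          = ps.flatten.drop (pos.toNat - p.length) := by
        rw [List.drop_append, List.drop_eq_nil_of_le (show p.length ≤ pos.toNat by omega),
            List.nil_append]
      have h3 : pos.toNat - p.length = (pos - (p.length : Int)).toNat := by omega
      rw [ih (pos - (p.length : Int)) h2 hle', ht, hd, h3]
      simp [List.append_assoc]

lemma pvInsert_flatten (pieces : List (List Char)) (idx : Int) (tag : List Char) :
    (pvInsert pieces ((pieces.flatten.length : Nat) : Int) idx tag).flatten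
      = PySem.List.slice pieces.flatten none (some idx) ++ tag ++
        PySem.List.slice pieces.flatten (some idx) none := by
  unfold pvInsert
  have hpos : (if idx < 0 then max 0 ((pieces.flatten.length : Int) + idx)
               else min idx (pieces.flatten.length : Int))
      = ((PySem.List.clampIdx pieces.flatten.length idx : Nat) : Int) := by
    simp only [PySem.List.clampIdx]
    split_ifs <;> omega
  rw [hpos, pvWalk_flatten tag pieces _ (by positivity)
        (by rw [Int.toNat_natCast]; exact pvClampLe _ _)]
  rw [Int.toNat_natCast, pvSliceTake, PySem.List.slice_some_none]

lemma pvInsert_length (pieces : List (List Char)) (idx : Int) (tag : List Char) :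
    (pvInsert pieces ((pieces.flatten.length : Nat) : Int) idx tag).flatten.length
      = pieces.flatten.length + tag.length := by
  rw [pvInsert_flatten, pvSliceTake, PySem.List.slice_some_none]
  have := pvClampLe pieces.flatten.length idx
  simp only [List.length_append, List.length_take, List.length_drop]
  omega

lemma pvLoop_eq (ts : List ((Int × Int) × String × String)) :
    ∀ (pieces : List (List Char)) (L offset : Int), L = (pieces.flatten.length : Int) →
    (pvBLoop ts pieces L offset).flatten = pvALoop ts pieces.flatten offset := by
  induction ts with
  | nil => intro pieces L offset _; simp [pvALoop, pvBLoop]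
  | cons hd rest ih =>
    obtain ⟨⟨a, b⟩, u, t⟩ := hd
    intro pieces L offset hL
    subst hL
    simp only [pvALoop, pvBLoop]
    have hc4 : ("</a>".toList.length : Nat) = 4 := by decide
    have h1 := pvInsert_flatten pieces (a + offset) (pvLinkStart u t)
    have hlen1 : (pieces.flatten.length : Int) + ((pvLinkStart u t).length : Int)
        = ((pvInsert pieces ((pieces.flatten.length : Nat) : Int) (a + offset)
             (pvLinkStart u t)).flatten.length : Int) := by
      rw [pvInsert_length]; push_cast; ring
    rw [hlen1]
    have h2 := pvInsert_flatten
      (pvInsert pieces ((pieces.flatten.length : Nat) : Int) (a + offset) (pvLinkStart u t))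
      (b + (offset + ((pvLinkStart u t).length : Int)) + 1) ("</a>".toList)
    have hlen2 : ((pvInsert pieces ((pieces.flatten.length : Nat) : Int) (a + offset)
          (pvLinkStart u t)).flatten.length : Int) + 4
        = ((pvInsert
            (pvInsert pieces ((pieces.flatten.length : Nat) : Int) (a + offset) (pvLinkStart u t))
            ((pvInsert pieces ((pieces.flatten.length : Nat) : Int) (a + offset)
               (pvLinkStart u t)).flatten.length : Int)
            (b + (offset + ((pvLinkStart u t).length : Int)) + 1)
            ("</a>".toList)).flatten.length : Int) := by
      rw [pvInsert_length
            (pvInsert pieces ((pieces.flatten.length : Nat) : Int) (a + offset) (pvLinkStart u t))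
            (b + (offset + ((pvLinkStart u t).length : Int)) + 1) ("</a>".toList), hc4]
      push_cast; ring
    rw [ih _ _ _ hlen2, h2, h1]
    have he : b + (offset + ((pvLinkStart u t).length : Int)) + 1
        = b + offset + ((pvLinkStart u t).length : Int) + 1 := by ring
    have hc : (("</a>".toList.length : Nat) : Int) = 4 := by exact_mod_cast hc4
    rw [he, hc]

-- ===== VERDICT (by name: the statement is the Claim_ definition above) =====
theorem inserisci_link_multipli_con_tooltip_spec : Claim_equal_inserisci_link_multipli_con_tooltip := by
  intro stringa intervalli urls tooltips _
  unfold Spec_inserisci_link_multipli_con_tooltip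
  unfold inserisci_link_multipli_con_tooltip inserisci_link_multipli_con_tooltip_alt
  have h := pvLoop_eq (intervalli.zip (urls.zip tooltips)) [stringa.toList]
    (stringa.toList.length : Int) 0 (by simp)
  simp only [List.flatten_cons, List.flatten_nil, List.append_nil] at h
  exact (congrArg String.ofList h).symm
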